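-- pv_equiv track=rewrite | github.com/daniel-reich/turbo-robot | FeNrBCG9rSdNeJTuX_23.py | max_possible
-- ===== SOURCE A (Python) =====
-- def max_possible(n1, n2):
--   second = str(n2)
--   first = str(n1)
--   maxnum = ""
--   for num in first:
--     if second == "":
--       maxnum += num
--     elif num < max(second):
--       maxnum += max(second)
--       second = second.replace(max(second),"",1)
--     else:
--       maxnum += num
--   return int(maxnum)
-- ===== SOURCE B (Python) =====
-- def max_possible(n1, n2):
--     d = sorted(str(n2), reverse=True)
--     p = 0
--     out = []
--     for ch in str(n1):
--         if p < len(d) and ch < d[p]: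
--             out.append(d[p])
--             p += 1
--         else:
--             out.append(ch)
--     return int("".join(out))
-- ===== Notes on version B (the rewrite author's own statement) =====
-- stated objective: simpler
-- what changed: Replaces the per-step recomputation of max(second) and str.replace with one descending sort of str(n2)'s characters and a single pointer-walk pass over str(n1).
import Mathlib
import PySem

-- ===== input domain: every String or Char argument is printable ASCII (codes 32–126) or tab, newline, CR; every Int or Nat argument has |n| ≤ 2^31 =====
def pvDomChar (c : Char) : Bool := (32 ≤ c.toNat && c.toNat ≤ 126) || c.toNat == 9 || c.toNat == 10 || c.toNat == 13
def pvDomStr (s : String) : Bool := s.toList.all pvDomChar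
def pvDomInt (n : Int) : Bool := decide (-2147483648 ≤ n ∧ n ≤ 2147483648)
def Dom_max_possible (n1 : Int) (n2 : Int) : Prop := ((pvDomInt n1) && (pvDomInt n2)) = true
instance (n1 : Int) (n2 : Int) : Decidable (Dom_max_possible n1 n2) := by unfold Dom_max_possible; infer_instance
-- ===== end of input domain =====

-- B replaces A's per-step max(second)/str.replace recomputation by one descending sort
-- of str(n2)'s characters and a single pointer-walk pass over str(n1) (objective: simpler).

-- ===== PORT A =====
-- one loop iteration of A: state = (maxnum, second), both as lists of chars
def pvStepA (st : List Char × List Char) (num : Char) : List Char × List Char :=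
  if st.2 = [] then (st.1 ++ [num], st.2)
  else
    match PySem.List.max? st.2 (fun c => c) with   -- max(second); the guard makes it some
    | none => (st.1 ++ [num], st.2)                -- unreachable (second ≠ "")
    | some m =>
      if num < m then
        -- second.replace(max(second), "", 1): removing the first occurrence of the
        -- single char m is exactly List.erase (hand port, exact)
        (st.1 ++ [m], st.2.erase m)
      else (st.1 ++ [num], st.2)

def max_possible (n1 : Int) (n2 : Int) : Int :=
  let second := PySem.Int.toChars n2               -- str(n2)
  let first := PySem.Int.toChars n1                -- str(n1)
  let r := first.foldl pvStepA ([], second)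
  -- int(maxnum): maxnum is always a sign-then-digits literal here, so ofChars? is some
  (PySem.Int.ofChars? r.1).getD 0

-- ===== PORT B =====
-- one loop iteration of B: state = (out, p); d is the descending-sorted char list
def pvStepB (d : List Char) (st : List Char × Nat) (ch : Char) : List Char × Nat :=
  match d[st.2]? with                              -- p < len(d) and d[p] (short-circuit)
  | some m => if ch < m then (st.1 ++ [m], st.2 + 1) else (st.1 ++ [ch], st.2)
  | none => (st.1 ++ [ch], st.2)

def max_possible_alt (n1 : Int) (n2 : Int) : Int :=
  let d := PySem.List.sorted (PySem.Int.toChars n2) (fun c => c) true  -- sorted(str(n2), reverse=True)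
  let r := (PySem.Int.toChars n1).foldl (pvStepB d) ([], 0)
  (PySem.Int.ofChars? r.1).getD 0                  -- int("".join(out))

-- ===== PRECONDITION & SPEC =====
def Spec_max_possible (n1 : Int) (n2 : Int) (out : Int) : Prop := out = max_possible_alt n1 n2
instance (n1 : Int) (n2 : Int) (out : Int) : Decidable (Spec_max_possible n1 n2 out) := by unfold Spec_max_possible; infer_instance

-- ===== CLAIM (what is proved, stated in full; the proofs are below) =====
def Claim_equal_max_possible : Prop := ∀ (n1 : Int) (n2 : Int), Dom_max_possible n1 n2 → Spec_max_possible n1 n2 (max_possible n1 n2)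

-- ===== LEMMAS AND PROOFS =====

-- Python's max over a nonempty bag of chars that is a permutation of a
-- descending-sorted list m :: rest is exactly m.
lemma pvMaxEq (s : List Char) (m : Char) (rest : List Char)
    (hperm : s.Perm (m :: rest)) (hsorted : (m :: rest).Pairwise (fun a b => b ≤ a)) :
    PySem.List.max? s (fun c => c) = some m := by
  have hne : s ≠ [] := by
    intro h; subst h; simpa using hperm.length_eq
  obtain ⟨x, hx⟩ : ∃ x, PySem.List.max? s (fun c => c) = some x := by
    cases h : PySem.List.max? s (fun c => c) with
    | none => exact absurd ((PySem.List.max?_eq_none_iff s (fun c => c)).1 h) hne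
    | some x => exact ⟨x, rfl⟩
  have hxmem : x ∈ s := PySem.List.max?_mem hx
  have hmax : ∀ y ∈ s, y ≤ x := PySem.List.max?_isMax hx
  have hmle : m ≤ x := hmax m (hperm.mem_iff.2 (List.mem_cons_self))
  have hxle : x ≤ m := by
    have hx' : x ∈ m :: rest := hperm.mem_iff.1 hxmem
    rcases List.mem_cons.1 hx' with h | h
    · exact le_of_eq h
    · exact (List.pairwise_cons.1 hsorted).1 x h
  rw [hx, le_antisymm hxle hmle]

-- The loop invariant: A's remaining `second` is a permutation of the unread
-- suffix d.drop p of B's descending-sorted list; then the two loops build the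
-- same output list.
lemma pvLoop_eq (d : List Char) (hd : d.Pairwise (fun a b => b ≤ a)) :
    ∀ (f : List Char) (acc s : List Char) (p : Nat), s.Perm (d.drop p) →
      (f.foldl pvStepA (acc, s)).1 = (f.foldl (pvStepB d) (acc, p)).1 := by
  intro f
  induction f with
  | nil => intro acc s p _; rfl
  | cons ch f ih =>
    intro acc s p hperm
    simp only [List.foldl_cons]
    cases hdrop : d.drop p with
    | nil =>
      have hs : s = [] := by
        rw [hdrop] at hperm; exact hperm.eq_nil
      have hget : d[p]? = none := by
        rw [← List.head?_drop, hdrop]; rfl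
      simp only [pvStepA, pvStepB, hs, hget, if_true]
      exact ih (acc ++ [ch]) [] p (hs ▸ hperm)
    | cons m rest =>
      have hperm' : s.Perm (m :: rest) := hdrop ▸ hperm
      have hsorted : (m :: rest).Pairwise (fun a b => b ≤ a) := by
        have := hd.drop (i := p); rwa [hdrop] at this
      have hsne : s ≠ [] := by
        intro h; subst h; simpa using hperm'.length_eq
      have hmax := pvMaxEq s m rest hperm' hsorted
      have hget : d[p]? = some m := by
        rw [← List.head?_drop, hdrop]; rfl
      simp only [pvStepA, pvStepB, hget, hmax, if_neg hsne]
      by_cases hc : ch < m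
      · simp only [if_pos hc]
        refine ih (acc ++ [m]) (s.erase m) (p + 1) ?_
        have h1 : d.drop (p + 1) = rest := by
          rw [← List.drop_drop, hdrop]; rfl
        rw [h1]
        have h2 : (m :: rest).erase m = rest := by
          simp [List.erase_cons_head]
        calc (s.erase m).Perm ((m :: rest).erase m) := hperm'.erase m
          _ = rest := h2
      · simp only [if_neg hc]
        exact ih (acc ++ [ch]) s p hperm

-- ===== VERDICT (by name: the statement is the Claim_ definition above) =====
theorem max_possible_spec : Claim_equal_max_possible := by
  intro n1 n2 _
  unfold Spec_max_possible max_possible max_possible_alt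
  have hmain :
      ((PySem.Int.toChars n1).foldl pvStepA ([], PySem.Int.toChars n2)).1 =
      ((PySem.Int.toChars n1).foldl
        (pvStepB (PySem.List.sorted (PySem.Int.toChars n2) (fun c => c) true)) ([], 0)).1 := by
    apply pvLoop_eq
    · exact PySem.List.sorted_pairwise_rev (PySem.Int.toChars n2) (fun c => c)
    · rw [List.drop_zero]
      exact (PySem.List.sorted_perm (PySem.Int.toChars n2) (fun c => c) true).symm
  simp only [hmain]
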